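-- pv_equiv track=rewrite | github.com/crazair/ML_Course | Lecture2_ClassicML/sc8_0.98008.py | repeated_pattern_score
-- ===== SOURCE A (Python) =====
-- def repeated_pattern_score(name):
--     if len(name) < 4:
--         return 0
--     max_repeat = 0
--     for pattern_len in range(2, min(6, len(name)//2 + 1)):
--         for i in range(len(name) - pattern_len * 2 + 1):
--             pattern = name[i:i+pattern_len]
--             count = 1
--             j = i + pattern_len
--             while j + pattern_len <= len(name) and name[j:j+pattern_len] == pattern:
--                 count += 1
--                 j += pattern_len
--             max_repeat = max(max_repeat, count)
--     return max_repeat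
-- ===== SOURCE B (Python) =====
-- def repeated_pattern_score(name):
--     # Right-to-left DP per pattern length: run[i] = consecutive repeats of the
--     # block starting at i, via adjacent-block equality (O(n) per length vs A's
--     # rescan-ahead from every start).
--     n = len(name)
--     if n < 4:
--         return 0
--     best = 1
--     for L in range(2, min(6, n // 2 + 1)):
--         run = [1] * n
--         for i in range(n - 2 * L, -1, -1):
--             if name[i:i + L] == name[i + L:i + 2 * L]:
--                 run[i] = run[i + L] + 1
--             else:
--                 run[i] = 1
--             best = max(best, run[i])
--     return best
-- ===== Notes on version B (the rewrite author's own statement) =====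
-- stated objective: faster
-- what changed: Per pattern length, B makes one right-to-left pass computing run[i] = run[i+L]+1 from a single adjacent-block equality test (DP), instead of A's rescan-ahead counting loop from every start position.
import Mathlib
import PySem

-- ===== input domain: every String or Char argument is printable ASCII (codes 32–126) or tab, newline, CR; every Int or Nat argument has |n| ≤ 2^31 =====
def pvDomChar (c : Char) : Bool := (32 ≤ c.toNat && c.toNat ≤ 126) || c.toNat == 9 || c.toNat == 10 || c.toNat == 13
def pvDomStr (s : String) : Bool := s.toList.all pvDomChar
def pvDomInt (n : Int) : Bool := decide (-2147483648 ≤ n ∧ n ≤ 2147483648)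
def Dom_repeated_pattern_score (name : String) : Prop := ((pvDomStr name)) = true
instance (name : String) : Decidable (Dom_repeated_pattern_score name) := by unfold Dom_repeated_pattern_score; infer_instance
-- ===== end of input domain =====

-- B replaces A's rescan-ahead counting loop from every start position by one right-to-left
-- DP pass per pattern length (run[i] = run[i+L] + 1 on adjacent-block equality): faster.

-- ===== PORT A =====
-- A's inner 'while' loop, counting successful iterations; fuel s.length bounds the
-- iteration count (each iteration advances j by pattern_len ≥ 2), so this is exact.
def pvAWhile (s : List Char) (patternLen : Int) (pattern : List Char) : Nat → Int → Int
  | 0, _ => 0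
  | fuel + 1, j =>
    if j + patternLen ≤ (s.length : Int) ∧
       PySem.List.slice s (some j) (some (j + patternLen)) = pattern
    then 1 + pvAWhile s patternLen pattern fuel (j + patternLen)
    else 0

def repeated_pattern_score (name : String) : Int :=
  let s := name.toList
  let n : Int := (s.length : Int)
  if n < 4 then 0
  else
    (PySem.List.pyRange 2 (min 6 (PySem.Int.floordiv n 2 + 1)) 1).foldl
      (fun max_repeat pattern_len =>
        (PySem.List.pyRange 0 (n - pattern_len * 2 + 1) 1).foldl
          (fun max_repeat i =>
            let pattern := PySem.List.slice s (some i) (some (i + pattern_len))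
            let count : Int := 1 + pvAWhile s pattern_len pattern s.length (i + pattern_len)
            max max_repeat count)
          max_repeat)
      0

-- ===== PORT B =====
def repeated_pattern_score_alt (name : String) : Int :=
  let s := name.toList
  let n : Int := (s.length : Int)
  if n < 4 then 0
  else
    (PySem.List.pyRange 2 (min 6 (PySem.Int.floordiv n 2 + 1)) 1).foldl
      (fun best L =>
        ((PySem.List.pyRange (n - 2 * L) (-1) (-1)).foldl
          (fun (st : List Int × Int) i =>
            let v : Int :=
              if PySem.List.slice s (some i) (some (i + L)) =
                 PySem.List.slice s (some (i + L)) (some (i + 2 * L))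
              then PySem.List.pyGetD st.1 (i + L) 0 + 1  -- run[i+L]; index provably in range
              else 1
            (PySem.List.pySetD st.1 i v, max st.2 v))   -- run[i] = v; in-range item assignment
          (List.replicate s.length (1 : Int), best)).2)
      1

-- ===== PRECONDITION & SPEC =====
def Spec_repeated_pattern_score (name : String) (out : Int) : Prop := out = repeated_pattern_score_alt name
instance (name : String) (out : Int) : Decidable (Spec_repeated_pattern_score name out) := by unfold Spec_repeated_pattern_score; infer_instance

-- ===== CLAIM (what is proved, stated in full; the proofs are below) =====
def Claim_equal_repeated_pattern_score : Prop := ∀ (name : String), Dom_repeated_pattern_score name → Spec_repeated_pattern_score name (repeated_pattern_score name)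

-- ===== LEMMAS AND PROOFS =====

-- the L-character block of s starting at position i
def pvSl (s : List Char) (i L : Nat) : List Char := (s.drop i).take L

-- number of consecutive repeats of the block starting at i (the common spec of both loops)
def pvRun (s : List Char) (L i : Nat) : Int :=
  if h : 0 < L ∧ i + 2 * L ≤ s.length ∧ pvSl s i L = pvSl s (i + L) L
  then pvRun s L (i + L) + 1
  else 1
termination_by s.length - i
decreasing_by omega

theorem pvRun_ge_one (s : List Char) (L i : Nat) : 1 ≤ pvRun s L i := by
  fun_induction pvRun s L i with
  | case1 _ _ ih => omega
  | case2 => omega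

theorem pvRun_of_big (s : List Char) (L i : Nat) (h : s.length < i + 2 * L) :
    pvRun s L i = 1 := by
  rw [pvRun, dif_neg]; omega

-- A's while loop computes pvRun: chained equality to the fixed pattern is adjacent-block equality
theorem pvAWhile_eq (s : List Char) (L : Nat) (hL : 2 ≤ L) :
    ∀ (fuel i : Nat), s.length ≤ fuel + i →
      1 + pvAWhile s (L : Int) (pvSl s i L) fuel ((i + L : Nat) : Int) = pvRun s L i := by
  intro fuel
  induction fuel with
  | zero =>
    intro i hi
    rw [pvAWhile, pvRun, dif_neg (by omega)]
    norm_num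
  | succ fuel ih =>
    intro i hi
    rw [pvAWhile]
    have hcast : ((i + L : Nat) : Int) + (L : Int) = ((i + L + L : Nat) : Int) := by push_cast; ring
    rw [hcast, PySem.List.slice_natCast s (i + L) (i + L + L),
        show (i + L + L) - (i + L) = L from by omega,
        show (s.drop (i + L)).take L = pvSl s (i + L) L from rfl]
    by_cases h : i + 2 * L ≤ s.length ∧ pvSl s i L = pvSl s (i + L) L
    · rw [if_pos ⟨by push_cast; omega, h.2.symm⟩, h.2, ih (i + L) (by omega),
          show pvRun s L i = pvRun s L (i + L) + 1 from by
            rw [pvRun, dif_pos ⟨by omega, h.1, h.2⟩]]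
      ring
    · rw [if_neg (by rintro ⟨h1, h2⟩; exact h ⟨by push_cast at h1; omega, h2.symm⟩),
          pvRun, dif_neg (by tauto)]
      norm_num

-- A's inner index loop, rewritten as a fold of max ∘ pvRun over List.range
theorem pvAInner (s : List Char) (L : Nat) (hL : 2 ≤ L) (h2 : 2 * L ≤ s.length) (acc : Int) :
    (PySem.List.pyRange 0 ((s.length : Int) - (L : Int) * 2 + 1) 1).foldl
      (fun m i =>
        max m (1 + pvAWhile s (L : Int)
          (PySem.List.slice s (some i) (some (i + (L : Int)))) s.length (i + (L : Int)))) acc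
    = (List.range (s.length - 2 * L + 1)).foldl (fun a k => max a (pvRun s L k)) acc := by
  rw [show ((s.length : Int) - (L : Int) * 2 + 1) = ((s.length - 2 * L + 1 : Nat) : Int) from by
        omega,
      PySem.List.pyRange_zero_nat, List.foldl_map]
  apply PySem.List.foldl_congr_mem
  intro a k hk
  rw [PySem.List.slice_natCast_add s k L,
      show (s.drop k).take L = pvSl s k L from rfl,
      show ((k : Int) + (L : Int)) = ((k + L : Nat) : Int) from by push_cast; ring,
      pvAWhile_eq s L hL s.length k (by omega)]

-- B's loop body, named for the invariant proof (definitionally equal to the port's lambda)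
def pvBStep (s : List Char) (L : Int) (st : List Int × Int) (i : Int) : List Int × Int :=
  let v : Int :=
    if PySem.List.slice s (some i) (some (i + L)) =
       PySem.List.slice s (some (i + L)) (some (i + 2 * L))
    then PySem.List.pyGetD st.1 (i + L) 0 + 1
    else 1
  (PySem.List.pySetD st.1 i v, max st.2 v)

-- B's state after the first t iterations (indices s.length-2L, …, s.length-2L-t+1)
def pvBPart (s : List Char) (L : Nat) (best : Int) (t : Nat) : List Int × Int :=
  ((List.range t).map (fun k => ((s.length - 2 * L - k : Nat) : Int))).foldl
    (pvBStep s (L : Int)) (List.replicate s.length (1 : Int), best)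

theorem pvBStep_eq (s : List Char) (L : Nat) (hL : 2 ≤ L) (st : List Int × Int) (j0 : Nat)
    (hj : j0 + 2 * L ≤ s.length)
    (hget : st.1.getD (j0 + L) 0 = pvRun s L (j0 + L)) :
    pvBStep s (L : Int) st ((j0 : Nat) : Int)
      = (st.1.set j0 (pvRun s L j0), max st.2 (pvRun s L j0)) := by
  rw [pvBStep]
  rw [PySem.List.slice_natCast_add s j0 L]
  rw [show ((j0 : Nat) : Int) + 2 * ((L : Nat) : Int) = ((j0 + L : Nat) : Int) + ((L : Nat) : Int) from by
        push_cast; ring]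
  rw [show ((j0 : Nat) : Int) + ((L : Nat) : Int) = ((j0 + L : Nat) : Int) from by push_cast; ring]
  rw [PySem.List.slice_natCast_add s (j0 + L) L]
  rw [show (s.drop j0).take L = pvSl s j0 L from rfl,
      show (s.drop (j0 + L)).take L = pvSl s (j0 + L) L from rfl]
  rw [PySem.List.pyGetD_natCast, hget]
  have hveq : pvRun s L j0 = (if pvSl s j0 L = pvSl s (j0 + L) L then pvRun s L (j0 + L) + 1 else 1) := by
    rw [pvRun]
    by_cases hEq : pvSl s j0 L = pvSl s (j0 + L) L
    · rw [dif_pos ⟨by omega, hj, hEq⟩, if_pos hEq]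
    · rw [dif_neg (by tauto), if_neg hEq]
  rw [← hveq, PySem.List.pySetD_natCast]

-- the loop invariant of B: processed cells hold pvRun, best accumulates their max
theorem pvBLoop (s : List Char) (L : Nat) (hL : 2 ≤ L) (h2 : 2 * L ≤ s.length) (best : Int) :
    ∀ t, t ≤ s.length - 2 * L + 1 →
      (pvBPart s L best t).1.length = s.length ∧
      (∀ j, j < s.length →
        (pvBPart s L best t).1.getD j 0 =
          if s.length - 2 * L < j + t then pvRun s L j else 1) ∧
      (pvBPart s L best t).2 =
        ((List.range t).map (fun k => s.length - 2 * L - k)).foldl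
          (fun a jj => max a (pvRun s L jj)) best := by
  intro t
  induction t with
  | zero =>
    intro _
    refine ⟨by simp [pvBPart], fun j hj => ?_, by simp [pvBPart]⟩
    simp only [pvBPart, List.range_zero, List.map_nil, List.foldl_nil]
    rw [List.getD_eq_getElem?_getD, List.getElem?_replicate, if_pos hj]
    split_ifs with hc
    · rw [pvRun_of_big s L j (by omega)]
      rfl
    · rfl
  | succ t ih =>
    intro ht
    obtain ⟨ihlen, ihget, ihsnd⟩ := ih (by omega)
    have hstep : pvBPart s L best (t + 1)
        = pvBStep s (L : Int) (pvBPart s L best t) ((s.length - 2 * L - t : Nat) : Int) := by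
      rw [pvBPart, List.range_succ, List.map_append, List.foldl_append]
      rfl
    have hget' : (pvBPart s L best t).1.getD ((s.length - 2 * L - t) + L) 0
        = pvRun s L ((s.length - 2 * L - t) + L) := by
      rw [ihget _ (by omega), if_pos (by omega)]
    rw [hstep, pvBStep_eq s L hL _ _ (by omega) hget']
    refine ⟨by simpa using ihlen, fun j hj => ?_, ?_⟩
    · rw [List.getD_eq_getElem?_getD, List.getElem?_set, ihlen]
      by_cases hjj : s.length - 2 * L - t = j
      · rw [if_pos hjj, if_pos (by omega), if_pos (by omega), ← hjj]
        rfl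
      · rw [if_neg hjj, ← List.getD_eq_getElem?_getD, ihget j hj]
        split_ifs with h1 h2 h2 <;> first | rfl | omega
    · rw [List.range_succ, List.map_append, List.foldl_append, ihsnd]
      rfl

-- B's inner countdown loop equals the same fold of max ∘ pvRun over List.range
theorem pvBInner (s : List Char) (L : Nat) (hL : 2 ≤ L) (h2 : 2 * L ≤ s.length) (best : Int) :
    ((PySem.List.pyRange ((s.length : Int) - 2 * (L : Int)) (-1) (-1)).foldl
      (fun (st : List Int × Int) i =>
        let v : Int :=
          if PySem.List.slice s (some i) (some (i + (L : Int))) =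
             PySem.List.slice s (some (i + (L : Int))) (some (i + 2 * (L : Int)))
          then PySem.List.pyGetD st.1 (i + (L : Int)) 0 + 1
          else 1
        (PySem.List.pySetD st.1 i v, max st.2 v))
      (List.replicate s.length (1 : Int), best)).2
    = (List.range (s.length - 2 * L + 1)).foldl (fun a k => max a (pvRun s L k)) best := by
  have hfun : (fun (st : List Int × Int) (i : Int) =>
      let v : Int :=
        if PySem.List.slice s (some i) (some (i + (L : Int))) =
           PySem.List.slice s (some (i + (L : Int))) (some (i + 2 * (L : Int)))
        then PySem.List.pyGetD st.1 (i + (L : Int)) 0 + 1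
        else 1
      (PySem.List.pySetD st.1 i v, max st.2 v)) = pvBStep s (L : Int) := rfl
  rw [hfun,
      show ((s.length : Int) - 2 * (L : Int)) = ((s.length - 2 * L : Nat) : Int) from by omega,
      PySem.List.pyRange_neg_one,
      show (((s.length - 2 * L : Nat) : Int) - (-1)).toNat = s.length - 2 * L + 1 from by omega,
      List.map_congr_left (l := List.range (s.length - 2 * L + 1))
        (f := fun k : Nat => ((s.length - 2 * L : Nat) : Int) - (k : Int))
        (g := fun k : Nat => ((s.length - 2 * L - k : Nat) : Int))
        (fun k hk => by
          simp only [List.mem_range] at hk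
          show ((s.length - 2 * L : Nat) : Int) - (k : Int) = ((s.length - 2 * L - k : Nat) : Int)
          omega)]
  rw [show ((List.range (s.length - 2 * L + 1)).map
        (fun k : Nat => ((s.length - 2 * L - k : Nat) : Int))).foldl (pvBStep s (L : Int))
        (List.replicate s.length (1 : Int), best) = pvBPart s L best (s.length - 2 * L + 1) from rfl]
  rw [(pvBLoop s L hL h2 best (s.length - 2 * L + 1) le_rfl).2.2]
  have h1 : (List.range (s.length - 2 * L + 1)).reverse
      = (List.range (s.length - 2 * L + 1)).map (fun x => 0 + (s.length - 2 * L + 1) - 1 - x) := by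
    conv_lhs => rw [List.range_eq_range']
    exact List.reverse_range'
  have hrev : (List.range (s.length - 2 * L + 1)).map (fun k => s.length - 2 * L - k)
      = (List.range (s.length - 2 * L + 1)).reverse := by
    rw [h1]
    exact List.map_congr_left (fun k hk => by
      show s.length - 2 * L - k = 0 + (s.length - 2 * L + 1) - 1 - k
      omega)
  rw [hrev]
  haveI : RightCommutative (fun (a : Int) (jj : Nat) => max a (pvRun s L jj)) :=
    ⟨fun a b c => by simp only [max_right_comm]⟩
  exact (List.reverse_perm (List.range (s.length - 2 * L + 1))).foldl_eq best

-- a fold of max over values ≥ 1 gives the same result from initial 0 and initial 1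
theorem pvFoldMax01 (l : List Nat) (f : Nat → Int) (hf : ∀ k, 1 ≤ f k) (hl : l ≠ []) :
    l.foldl (fun a k => max a (f k)) 0 = l.foldl (fun a k => max a (f k)) 1 := by
  cases l with
  | nil => exact absurd rfl hl
  | cons k tl =>
    simp only [List.foldl_cons]
    congr 1
    have := hf k; omega

-- ===== VERDICT (by name: the statement is the Claim_ definition above) =====
theorem repeated_pattern_score_spec : Claim_equal_repeated_pattern_score := by
  intro name _
  unfold Spec_repeated_pattern_score
  simp only [repeated_pattern_score, repeated_pattern_score_alt]
  by_cases h4 : ((name.toList.length : Int)) < 4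
  · rw [if_pos h4, if_pos h4]
  · rw [if_neg h4, if_neg h4]
    have hlen4 : 4 ≤ name.toList.length := by omega
    have hmem2 : (2 : Int) < min 6 (PySem.Int.floordiv (name.toList.length : Int) 2 + 1) := by
      rw [PySem.Int.floordiv_eq_ediv_of_pos (by norm_num)]
      omega
    refine Eq.trans
      (PySem.List.foldl_congr_mem _ _ (fun acc LI =>
        (List.range (name.toList.length - 2 * LI.toNat + 1)).foldl
          (fun a k => max a (pvRun name.toList LI.toNat k)) acc) _ ?_)
      (Eq.trans ?_
        (PySem.List.foldl_congr_mem _ _ (fun acc LI =>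
          (List.range (name.toList.length - 2 * LI.toNat + 1)).foldl
            (fun a k => max a (pvRun name.toList LI.toNat k)) acc) _ ?_).symm)
    · -- A's per-pattern-length loop computes the max of pvRun
      intro acc LI hLI
      rw [PySem.List.mem_pyRange_one] at hLI
      rw [PySem.Int.floordiv_eq_ediv_of_pos (by norm_num)] at hLI
      lift LI to Nat using (by omega : (0 : Int) ≤ LI) with LN
      simp only [Int.toNat_natCast]
      exact pvAInner name.toList LN (by omega) (by omega) acc
    · -- the two outer folds agree: initial 0 vs 1 is absorbed by the first (L = 2) pass
      rw [PySem.List.pyRange_one_cons hmem2]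
      simp only [List.foldl_cons]
      congr 1
      show (List.range (name.toList.length - 2 * 2 + 1)).foldl
          (fun a k => max a (pvRun name.toList 2 k)) 0
        = (List.range (name.toList.length - 2 * 2 + 1)).foldl
          (fun a k => max a (pvRun name.toList 2 k)) 1
      exact pvFoldMax01 _ _ (pvRun_ge_one name.toList 2)
        (by rw [ne_eq, List.range_eq_nil]; omega)
    · -- B's per-pattern-length loop computes the max of pvRun
      intro acc LI hLI
      rw [PySem.List.mem_pyRange_one] at hLI
      rw [PySem.Int.floordiv_eq_ediv_of_pos (by norm_num)] at hLI
      lift LI to Nat using (by omega : (0 : Int) ≤ LI) with LN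
      simp only [Int.toNat_natCast]
      exact pvBInner name.toList LN (by omega) (by omega) acc
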